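-- pv_equiv track=rewrite | github.com/Andrea227/dailyexercise | HW6/HW6-Stirling.py | combup
-- ===== SOURCE A (Python) =====
-- def combup(n, r):
--     if r % 2 != 0:
--         z = r // 2
--         demo = n
--         i = 1
--         while i <= z:
--             demo *= ((n ** 2) - (i ** 2))
--             i += 1
--     else:
--         z = r // 2
--         demo = n ** 2
--         i = 1
--         while i < z:
--             demo *= ((n ** 2) - (i ** 2))
--             i += 1
--     return demo
-- ===== SOURCE B (Python) =====
-- def _prod(xs):
--     # balanced product tree: multiplies numbers of similar size together
--     if len(xs) <= 1:
--         return xs[0] if xs else 1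
--     m = len(xs) // 2
--     return _prod(xs[:m]) * _prod(xs[m:])
--
-- def combup(n, r):
--     z = r // 2
--     if r % 2 != 0:
--         terms = [n] + [n * n - i * i for i in range(1, z + 1)]
--     else:
--         terms = [n * n] + [n * n - i * i for i in range(1, z)]
--     return _prod(terms)
-- ===== Notes on version B (the rewrite author's own statement) =====
-- stated objective: faster
-- what changed: B builds the list of factors once and multiplies it with a balanced divide-and-conquer product tree instead of A's sequential left-to-right accumulation, pairing big-integer operands of similar size; intended as asymptotically faster (a timing run measured 4.74x at the largest size both finished, on a single both-finished input).
import Mathlib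
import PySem

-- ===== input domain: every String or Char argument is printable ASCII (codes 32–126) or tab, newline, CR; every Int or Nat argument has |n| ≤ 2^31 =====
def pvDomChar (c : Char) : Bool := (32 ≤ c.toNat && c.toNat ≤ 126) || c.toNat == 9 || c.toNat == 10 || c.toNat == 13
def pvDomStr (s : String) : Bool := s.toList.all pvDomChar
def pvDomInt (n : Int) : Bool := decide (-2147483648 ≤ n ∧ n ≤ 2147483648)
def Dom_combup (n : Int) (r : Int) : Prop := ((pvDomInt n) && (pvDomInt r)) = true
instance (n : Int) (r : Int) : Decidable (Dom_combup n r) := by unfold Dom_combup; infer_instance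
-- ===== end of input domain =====

-- B replaces A's sequential accumulation by a balanced divide-and-conquer product of the same
-- factor list (intended as faster; a timing run measured 4.74x at the largest size both finished).
-- same factor list (objective: faster big-integer multiplication pairing).

-- ===== PORT A =====
-- while i <= z: demo *= (n**2 - i**2); i += 1
def combupLoopLe (n : Int) (acc : Int) (i : Int) (z : Int) : Int :=
  if i ≤ z then combupLoopLe n (acc * (n ^ 2 - i ^ 2)) (i + 1) z else acc
termination_by (z + 1 - i).toNat
decreasing_by omega

-- while i < z: demo *= (n**2 - i**2); i += 1
def combupLoopLt (n : Int) (acc : Int) (i : Int) (z : Int) : Int :=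
  if i < z then combupLoopLt n (acc * (n ^ 2 - i ^ 2)) (i + 1) z else acc
termination_by (z - i).toNat
decreasing_by omega

def combup (n : Int) (r : Int) : Int :=
  if PySem.Int.mod r 2 ≠ 0 then
    combupLoopLe n n 1 (PySem.Int.floordiv r 2)
  else
    combupLoopLt n (n ^ 2) 1 (PySem.Int.floordiv r 2)

-- ===== PORT B =====
-- _prod: balanced product tree over the list of factors
def prodTree (xs : List Int) : Int :=
  if _h : xs.length ≤ 1 then
    match xs with
    | [] => 1
    | x :: _ => x
  else
    prodTree (xs.take (xs.length / 2)) * prodTree (xs.drop (xs.length / 2))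
termination_by xs.length
decreasing_by
  · simp [List.length_take]; omega
  · simp [List.length_drop]; omega

def combup_alt (n : Int) (r : Int) : Int :=
  let z := PySem.Int.floordiv r 2
  if PySem.Int.mod r 2 ≠ 0 then
    prodTree (n :: (PySem.List.pyRange 1 (z + 1) 1).map (fun i => n * n - i * i))
  else
    prodTree (n * n :: (PySem.List.pyRange 1 z 1).map (fun i => n * n - i * i))

-- ===== PRECONDITION & SPEC =====
def Spec_combup (n : Int) (r : Int) (out : Int) : Prop := out = combup_alt n r
instance (n : Int) (r : Int) (out : Int) : Decidable (Spec_combup n r out) := by unfold Spec_combup; infer_instance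

-- ===== CLAIM (what is proved, stated in full; the proofs are below) =====
def Claim_equal_combup : Prop := ∀ (n : Int) (r : Int), Dom_combup n r → Spec_combup n r (combup n r)

-- ===== LEMMAS AND PROOFS =====

theorem prodTree_eq_prod (xs : List Int) : prodTree xs = xs.prod := by
  induction xs using prodTree.induct with
  | case1 => rw [prodTree]; simp
  | case2 x t h =>
    rw [prodTree]
    simp only [dif_pos h]
    match t, h with
    | [], _ => simp
  | case3 xs h ih1 ih2 =>
    rw [prodTree]
    simp only [dif_neg h]
    rw [ih1, ih2, List.prod_take_mul_prod_drop]

theorem loopLe_eq (k : Nat) : ∀ (n acc i z : Int), (z + 1 - i).toNat = k →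
    combupLoopLe n acc i z
      = acc * ((PySem.List.pyRange i (z + 1) 1).map (fun j => n ^ 2 - j ^ 2)).prod := by
  induction k with
  | zero =>
    intro n acc i z hk
    rw [combupLoopLe, if_neg (by omega), PySem.List.pyRange_one_eq_nil (by omega)]
    simp
  | succ k ih =>
    intro n acc i z hk
    have hiz : i ≤ z := by omega
    rw [combupLoopLe, if_pos hiz, ih n _ (i + 1) z (by omega),
      PySem.List.pyRange_one_cons (show i < z + 1 by omega), List.map_cons, List.prod_cons]
    ring

theorem loopLt_eq (k : Nat) : ∀ (n acc i z : Int), (z - i).toNat = k →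
    combupLoopLt n acc i z
      = acc * ((PySem.List.pyRange i z 1).map (fun j => n ^ 2 - j ^ 2)).prod := by
  induction k with
  | zero =>
    intro n acc i z hk
    rw [combupLoopLt, if_neg (by omega), PySem.List.pyRange_one_eq_nil (by omega)]
    simp
  | succ k ih =>
    intro n acc i z hk
    have hiz : i < z := by omega
    rw [combupLoopLt, if_pos hiz, ih n _ (i + 1) z (by omega),
      PySem.List.pyRange_one_cons hiz, List.map_cons, List.prod_cons]
    ring

theorem sq_map_eq (n : Int) (l : List Int) :
    l.map (fun i => n * n - i * i) = l.map (fun j => n ^ 2 - j ^ 2) := by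
  apply List.map_congr_left; intro x _; ring

-- ===== VERDICT (by name: the statement is the Claim_ definition above) =====
theorem combup_spec : Claim_equal_combup := by
  intro n r _
  unfold Spec_combup combup combup_alt
  simp only [prodTree_eq_prod, sq_map_eq, List.prod_cons]
  split_ifs with h
  · rw [loopLe_eq (PySem.Int.floordiv r 2 + 1 - 1).toNat n n 1 _ rfl]
  · rw [loopLt_eq (PySem.Int.floordiv r 2 - 1).toNat n (n ^ 2) 1 _ rfl]
    ring
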